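-- pv_equiv track=rewrite | github.com/shirillm/Data-structures | Первый семестр Shipov/Задание_8.py | swap_quarters
-- ===== SOURCE A (Python) =====
-- def swap_quarters(matrix):
-- 	# Получаем количество строк и столбцов матрицы
-- 	M = len(matrix)
-- 	N = len(matrix[0])
--
-- 	# Проверяем, что размерности матрицы четные
-- 	if M % 2 != 0 or N % 2 != 0:
-- 		raise ValueError("Размеры матрицы должны быть четными числами")
--
-- 	# Вычисляем середины матрицы по строкам и столбцам
-- 	mid_row = M // 2
-- 	mid_col = N // 2
--
-- 	# Проходим по всем элементам левой верхней и правой нижней четвертей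
-- 	for i in range(mid_row):
-- 		for j in range(mid_col):
-- 			# Сохраняем значение из левой верхней четверти
-- 			temp = matrix[i][j]
--
-- 			# Заменяем значение в левой верхней четверти на значение из правой нижней
-- 			matrix[i][j] = matrix[i + mid_row][j + mid_col]
--
-- 			# Заменяем значение в правой нижней четверти на сохраненное значение
-- 			matrix[i + mid_row][j + mid_col] = temp
--
-- 	return matrix
-- ===== SOURCE B (Python) =====
-- # Non-mutating rebuild: assemble the swapped matrix from whole row slices
-- # (top rows = bottom-right quarter + old top-right; bottom rows = old
-- # bottom-left + old top-left).  Return value equals A's; unlike A it does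
-- # not mutate the argument.
-- def swap_quarters(matrix):
--     M = len(matrix)
--     N = len(matrix[0])
--     if M % 2 != 0 or N % 2 != 0:
--         raise ValueError("Размеры матрицы должны быть четными числами")
--     mr, mc = M // 2, N // 2
--     top = [matrix[i + mr][mc:] + matrix[i][mc:] for i in range(mr)]
--     bottom = [matrix[i + mr][:mc] + matrix[i][:mc] for i in range(mr)]
--     return top + bottom
-- ===== Notes on version B (the rewrite author's own statement) =====
-- stated objective: simpler
-- what changed: Replaces the in-place nested element-swap loops with a non-mutating rebuild that concatenates whole quarter-row slices (top rows = bottom-right quarter + top-right, bottom rows = bottom-left + top-left); Pre_ excludes empty and non-rectangular matrices, on which A raises or its per-element swap shape is accidental.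
-- outside the precondition, e.g. on swap_quarters([[1, 2], [3, 4, 5, 6]]): A returns [[4, 2], [3, 1, 5, 6]], B returns [[4, 5, 6, 2], [3, 1]]
import Mathlib
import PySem

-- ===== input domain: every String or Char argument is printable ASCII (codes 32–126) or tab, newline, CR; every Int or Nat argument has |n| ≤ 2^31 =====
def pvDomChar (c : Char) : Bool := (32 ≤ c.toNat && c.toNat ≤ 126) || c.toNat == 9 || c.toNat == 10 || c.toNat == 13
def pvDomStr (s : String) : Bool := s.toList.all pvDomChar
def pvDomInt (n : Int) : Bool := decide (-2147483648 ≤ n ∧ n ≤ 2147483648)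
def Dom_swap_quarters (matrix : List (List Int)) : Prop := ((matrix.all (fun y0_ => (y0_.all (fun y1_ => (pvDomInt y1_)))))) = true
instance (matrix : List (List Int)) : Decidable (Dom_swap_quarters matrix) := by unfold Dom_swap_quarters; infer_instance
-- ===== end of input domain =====

-- B replaces A's in-place nested element-swap loops by a non-mutating rebuild from
-- whole quarter-row slices; equivalence is about the RETURN value only (A mutates
-- its argument, B does not).

-- ===== PORT A =====
-- Literal transliteration: nested for-loops over range(mid_row), range(mid_col),
-- mutating the matrix via set; matrix[0] on [] (IndexError) and the ValueError
-- branch are outside Pre_ and return the input unchanged here.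
def swap_quarters (matrix : List (List Int)) : List (List Int) :=
  let M := matrix.length
  let N := (matrix.headD []).length
  if M % 2 ≠ 0 ∨ N % 2 ≠ 0 then matrix
  else
    (List.range (M / 2)).foldl (fun m i =>
      (List.range (N / 2)).foldl (fun m j =>
        let temp := ((m.getD i []).getD j 0)
        let m' := m.set i ((m.getD i []).set j ((m.getD (i + M / 2) []).getD (j + N / 2) 0))
        m'.set (i + M / 2) ((m'.getD (i + M / 2) []).set (j + N / 2) temp)) m) matrix

-- ===== PORT B =====
-- Transliteration of Source B: two list comprehensions over range(mr), each row built
-- by concatenating slices of the ORIGINAL matrix (take/drop are exact for the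
-- nonnegative slice bounds used here).
def swap_quarters_alt (matrix : List (List Int)) : List (List Int) :=
  let M := matrix.length
  let N := (matrix.headD []).length
  if M % 2 ≠ 0 ∨ N % 2 ≠ 0 then matrix
  else
    let mr := M / 2
    let mc := N / 2
    ((List.range mr).map (fun i => (matrix.getD (i + mr) []).drop mc ++ (matrix.getD i []).drop mc))
      ++ ((List.range mr).map (fun i => (matrix.getD (i + mr) []).take mc ++ (matrix.getD i []).take mc))

-- ===== PRECONDITION & SPEC =====
-- Pre_ excludes the empty matrix (A raises IndexError on matrix[0]), odd dimensions
-- (A raises ValueError), and non-rectangular matrices: on ragged rows A either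
-- raises IndexError or its per-element swap shape is an accident of A's indexing,
-- while B's slice rebuild resizes rows — both behaviours are artefacts, so ragged
-- input is excluded.
def Pre_swap_quarters (matrix : List (List Int)) : Prop :=
  matrix ≠ [] ∧ matrix.length % 2 = 0 ∧ (matrix.headD []).length % 2 = 0 ∧
    ∀ row ∈ matrix, row.length = (matrix.headD []).length
instance (matrix : List (List Int)) : Decidable (Pre_swap_quarters matrix) := by
  unfold Pre_swap_quarters; infer_instance

def pvWitness_swap_quarters : List (List Int) := [[1, 2], [3, 4]]

def Spec_swap_quarters (matrix : List (List Int)) (out : List (List Int)) : Prop := out = swap_quarters_alt matrix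
instance (matrix : List (List Int)) (out : List (List Int)) : Decidable (Spec_swap_quarters matrix out) := by unfold Spec_swap_quarters; infer_instance

-- ===== CLAIM (what is proved, stated in full; the proofs are below) =====
def Claim_equal_swap_quarters : Prop := ∀ (matrix : List (List Int)), Dom_swap_quarters matrix → Pre_swap_quarters matrix → Spec_swap_quarters matrix (swap_quarters matrix)

-- ===== LEMMAS AND PROOFS =====

-- The inner-loop body of port A, named for the proofs (definitionally equal to the
-- lambda in swap_quarters with mc = N/2, imr = i + M/2).
def innerStep (mc i imr : Nat) (m : List (List Int)) (j : Nat) : List (List Int) :=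
  let temp := ((m.getD i []).getD j 0)
  let m' := m.set i ((m.getD i []).set j ((m.getD imr []).getD (j + mc) 0))
  m'.set imr ((m'.getD imr []).set (j + mc) temp)

theorem portA_eq (matrix : List (List Int)) :
    swap_quarters matrix =
      (if matrix.length % 2 ≠ 0 ∨ (matrix.headD []).length % 2 ≠ 0 then matrix
       else (List.range (matrix.length / 2)).foldl
         (fun m i => (List.range ((matrix.headD []).length / 2)).foldl
           (innerStep ((matrix.headD []).length / 2) i (i + matrix.length / 2)) m) matrix) := rfl

theorem pv_getD_append_right {α : Type} (xs ys : List α) (n : Nat) (d : α) :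
    (xs ++ ys).getD (xs.length + n) d = ys.getD n d := by
  induction xs with
  | nil => simp
  | cons x xs ih => simpa [Nat.succ_add] using ih

theorem pv_set_append_right {α : Type} (xs ys : List α) (n : Nat) (v : α) :
    (xs ++ ys).set (xs.length + n) v = xs ++ ys.set n v := by
  induction xs with
  | nil => simp
  | cons x xs ih => simp [Nat.succ_add, ih]

theorem pv_set_append_right' {α : Type} (xs ys : List α) (n : Nat) (v : α) (h : xs.length ≤ n) :
    (xs ++ ys).set n v = xs ++ ys.set (n - xs.length) v := by
  induction xs generalizing n with
  | nil => simp
  | cons x xs ih =>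
    cases n with
    | zero => simp at h
    | succ n => simp [ih n (Nat.le_of_succ_le_succ h)]

theorem pv_getElem?_append_right' {α : Type} (xs ys : List α) (n : Nat) (h : xs.length ≤ n) :
    (xs ++ ys)[n]? = ys[n - xs.length]? := List.getElem?_append_right h

theorem pv_getD_set_self {α : Type} (m : List α) (i : Nat) (a d : α) (h : i < m.length) :
    (m.set i a).getD i d = a := by
  simp [List.getD_eq_getElem?_getD, h]

theorem pv_getD_set_ne {α : Type} (m : List α) (i j : Nat) (a d : α) (h : i ≠ j) :
    (m.set i a).getD j d = m.getD j d := by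
  simp [List.getD_eq_getElem?_getD, List.getElem?_set_ne h]

theorem pv_set_of_getElem? {α : Type} (m : List α) (i : Nat) (v : α) (h : m[i]? = some v) :
    m.set i v = m := by
  induction m generalizing i with
  | nil => rfl
  | cons x l ih =>
    cases i with
    | zero => simp at h; simp [h]
    | succ i => simp at h ⊢; exact ih i h

theorem pv_getD_eq {α : Type} (m : List α) (i : Nat) (d : α) (h : i < m.length) :
    m.getD i d = m[i] := by
  simp [List.getD_eq_getElem?_getD, List.getElem?_eq_getElem h]

theorem pv_take_succ {α : Type} (l : List α) (k : Nat) (h : k < l.length) :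
    l.take (k + 1) = l.take k ++ [l[k]] := by
  rw [List.take_add_one, List.getElem?_eq_getElem h]; rfl

theorem inner_aux (mc i imr : Nat) (hne : i ≠ imr) (m : List (List Int)) (top bot : List Int)
    (htl : top.length = mc + mc) (hbl : bot.length = mc + mc)
    (hti : m[i]? = some top) (hbi : m[imr]? = some bot) :
    ∀ k, k ≤ mc →
    (List.range k).foldl (innerStep mc i imr) m
      = (m.set i ((bot.drop mc).take k ++ top.drop k)).set imr
          (bot.take mc ++ top.take k ++ bot.drop (mc + k)) := by
  have hi : i < m.length := (List.getElem?_eq_some_iff.mp hti).1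
  have hjm : imr < m.length := (List.getElem?_eq_some_iff.mp hbi).1
  intro k hk
  induction k with
  | zero =>
    simp only [List.range_zero, List.foldl_nil, List.take_zero, List.drop_zero,
      Nat.add_zero, List.nil_append, List.append_nil]
    rw [List.take_append_drop, pv_set_of_getElem? _ _ _ hti, pv_set_of_getElem? _ _ _ hbi]
  | succ k ih =>
    have hk' : k ≤ mc := Nat.le_of_succ_le hk
    have hklt : k < mc := hk
    have hkt : k < top.length := by omega
    have hkb : mc + k < bot.length := by omega
    have hkdb : k < (bot.drop mc).length := by simp [hbl]; omega
    rw [List.range_succ, List.foldl_append, ih hk', List.foldl_cons, List.foldl_nil]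
    set A := (bot.drop mc).take k ++ top.drop k with hA
    set Bk := bot.take mc ++ top.take k ++ bot.drop (mc + k) with hB
    have hlA : ((bot.drop mc).take k).length = k := by simp [hbl]; omega
    have hlB : (bot.take mc ++ top.take k).length = mc + k := by simp [hbl, htl]; omega
    have e1 : (((m.set i A).set imr Bk).getD i []) = A := by
      rw [pv_getD_set_ne _ _ _ _ _ (Ne.symm hne), pv_getD_set_self _ _ _ _ hi]
    have e2 : (((m.set i A).set imr Bk).getD imr []) = Bk :=
      pv_getD_set_self _ _ _ _ (by simpa using hjm)
    have etemp : A.getD k 0 = top[k] := by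
      rw [hA]
      calc ((bot.drop mc).take k ++ top.drop k).getD k 0
          = ((bot.drop mc).take k ++ top.drop k).getD (((bot.drop mc).take k).length + 0) 0 := by
            rw [Nat.add_zero, hlA]
        _ = (top.drop k).getD 0 0 := pv_getD_append_right _ _ _ _
        _ = top[k] := by rw [List.drop_eq_getElem_cons hkt]; rfl
    have eval : Bk.getD (k + mc) 0 = bot[mc + k] := by
      rw [hB]
      calc ((bot.take mc ++ top.take k) ++ bot.drop (mc + k)).getD (k + mc) 0
          = ((bot.take mc ++ top.take k) ++ bot.drop (mc + k)).getD
              ((bot.take mc ++ top.take k).length + 0) 0 := by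
            rw [Nat.add_zero, hlB, Nat.add_comm k mc]
        _ = (bot.drop (mc + k)).getD 0 0 := pv_getD_append_right _ _ _ _
        _ = bot[mc + k] := by rw [List.drop_eq_getElem_cons hkb]; rfl
    have eA : A.set k (bot[mc + k]) = (bot.drop mc).take (k + 1) ++ top.drop (k + 1) := by
      rw [hA]
      calc ((bot.drop mc).take k ++ top.drop k).set k (bot[mc + k])
          = ((bot.drop mc).take k ++ top.drop k).set (((bot.drop mc).take k).length + 0)
              (bot[mc + k]) := by rw [Nat.add_zero, hlA]
        _ = (bot.drop mc).take k ++ (top.drop k).set 0 (bot[mc + k]) := pv_set_append_right _ _ _ _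
        _ = (bot.drop mc).take k ++ (bot[mc + k] :: top.drop (k + 1)) := by
              rw [List.drop_eq_getElem_cons hkt]; rfl
        _ = ((bot.drop mc).take k ++ [(bot.drop mc)[k]]) ++ top.drop (k + 1) := by
              simp [List.getElem_drop]
        _ = (bot.drop mc).take (k + 1) ++ top.drop (k + 1) := by rw [pv_take_succ _ _ hkdb]
    have eB : Bk.set (k + mc) (top[k])
        = bot.take mc ++ top.take (k + 1) ++ bot.drop (mc + (k + 1)) := by
      rw [hB]
      calc ((bot.take mc ++ top.take k) ++ bot.drop (mc + k)).set (k + mc) (top[k])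
          = ((bot.take mc ++ top.take k) ++ bot.drop (mc + k)).set
              ((bot.take mc ++ top.take k).length + 0) (top[k]) := by
            rw [Nat.add_zero, hlB, Nat.add_comm k mc]
        _ = (bot.take mc ++ top.take k) ++ (bot.drop (mc + k)).set 0 (top[k]) :=
              pv_set_append_right _ _ _ _
        _ = (bot.take mc ++ top.take k) ++ (top[k] :: bot.drop (mc + k + 1)) := by
              rw [List.drop_eq_getElem_cons hkb]; rfl
        _ = bot.take mc ++ top.take (k + 1) ++ bot.drop (mc + (k + 1)) := by
              rw [show mc + k + 1 = mc + (k + 1) by omega, pv_take_succ _ _ hkt]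
              simp only [List.append_assoc, List.singleton_append]
    show innerStep mc i imr ((m.set i A).set imr Bk) k = _
    simp only [innerStep]
    rw [e1, e2, etemp, eval, eA]
    rw [List.set_comm _ _ (Ne.symm hne), List.set_set]
    rw [pv_getD_set_self _ _ _ _ (by simpa using hjm), eB, List.set_set]

theorem inner_swap (mc i imr : Nat) (hne : i ≠ imr) (m : List (List Int)) (top bot : List Int)
    (htl : top.length = mc + mc) (hbl : bot.length = mc + mc)
    (hti : m[i]? = some top) (hbi : m[imr]? = some bot) :
    (List.range mc).foldl (innerStep mc i imr) m
      = (m.set i (bot.drop mc ++ top.drop mc)).set imr (bot.take mc ++ top.take mc) := by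
  rw [inner_aux mc i imr hne m top bot htl hbl hti hbi mc (Nat.le_refl mc)]
  have h1 : (bot.drop mc).take mc = bot.drop mc :=
    List.take_of_length_le (by simp [hbl])
  have h2 : bot.drop (mc + mc) = ([] : List Int) :=
    List.drop_eq_nil_of_le (by omega)
  rw [h1, h2, List.append_nil]

def rowTop (orig : List (List Int)) (mr mc i : Nat) : List Int :=
  (orig.getD (i + mr) []).drop mc ++ (orig.getD i []).drop mc

def rowBot (orig : List (List Int)) (mr mc i : Nat) : List Int :=
  (orig.getD (i + mr) []).take mc ++ (orig.getD i []).take mc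

theorem outer_aux (orig : List (List Int)) (mr mc : Nat) (hlen : orig.length = mr + mr)
    (hrect : ∀ row ∈ orig, row.length = mc + mc) :
    ∀ t, t ≤ mr →
    (List.range t).foldl
        (fun m i => (List.range mc).foldl (innerStep mc i (i + mr)) m) orig
      = (List.range t).map (rowTop orig mr mc)
          ++ (((orig.drop t).take (mr - t))
          ++ ((List.range t).map (rowBot orig mr mc)
          ++ orig.drop (mr + t))) := by
  intro t ht
  induction t with
  | zero =>
    simp only [List.range_zero, List.foldl_nil, List.map_nil, List.nil_append,
      List.drop_zero, Nat.sub_zero, Nat.add_zero]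
    rw [List.take_append_drop]
  | succ t ih =>
    have ht' : t ≤ mr := Nat.le_of_succ_le ht
    have htlt : t < mr := ht
    have htL : t < orig.length := by omega
    have htmrL : t + mr < orig.length := by omega
    rw [List.range_succ, List.foldl_append, ih ht', List.foldl_cons, List.foldl_nil]
    set T := (List.range t).map (rowTop orig mr mc) with hT
    set B := (List.range t).map (rowBot orig mr mc) with hBdef
    have hTl : T.length = t := by simp [hT]
    have hBl : B.length = t := by simp [hBdef]
    set Mid' := (orig.drop (t + 1)).take (mr - (t + 1)) with hMid'
    have hgt : orig.getD t [] = orig[t] := pv_getD_eq _ _ _ htL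
    have hgb : orig.getD (t + mr) [] = orig[t + mr] := pv_getD_eq _ _ _ htmrL
    have hMid : (orig.drop t).take (mr - t) = orig.getD t [] :: Mid' := by
      rw [hgt, List.drop_eq_getElem_cons htL, show mr - t = (mr - (t + 1)) + 1 by omega]
      rfl
    have hR : orig.drop (mr + t) = orig.getD (t + mr) [] :: orig.drop (mr + (t + 1)) := by
      rw [show mr + t = t + mr by omega, hgb, List.drop_eq_getElem_cons htmrL,
        show t + mr + 1 = mr + (t + 1) by omega]
    have hstate : T ++ (((orig.drop t).take (mr - t)) ++ (B ++ orig.drop (mr + t)))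
        = T ++ (orig.getD t [] :: (Mid' ++ (B ++ (orig.getD (t + mr) [] :: orig.drop (mr + (t + 1)))))) := by
      rw [hMid, hR]; simp
    rw [hstate]
    set st := T ++ (orig.getD t [] :: (Mid' ++ (B ++ (orig.getD (t + mr) [] :: orig.drop (mr + (t + 1)))))) with hst
    have hMid'l : Mid'.length = mr - (t + 1) := by
      simp [hMid', hlen]; omega
    have hti : st[t]? = some (orig.getD t []) := by
      rw [hst, pv_getElem?_append_right' _ _ _ (Nat.le_of_eq hTl)]
      simp [hTl]
    have hre2 : ∀ (r : List Int), T ++ (r :: (Mid' ++ (B ++ (orig.getD (t + mr) [] :: orig.drop (mr + (t + 1))))))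
        = (T ++ r :: Mid' ++ B) ++ (orig.getD (t + mr) [] :: orig.drop (mr + (t + 1))) := by
      intro r; simp
    have hl2 : ∀ (r : List Int), (T ++ r :: Mid' ++ B).length = mr + t := by
      intro r; simp [hTl, hBl, hMid'l]; omega
    have hbi : st[t + mr]? = some (orig.getD (t + mr) []) := by
      rw [hst, hre2, pv_getElem?_append_right' _ _ _ (by rw [hl2]; omega), hl2,
        show t + mr - (mr + t) = 0 by omega]
      rfl
    have htoplen : (orig.getD t []).length = mc + mc := by
      rw [hgt]; exact hrect _ (List.getElem_mem htL)
    have hbotlen : (orig.getD (t + mr) []).length = mc + mc := by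
      rw [hgb]; exact hrect _ (List.getElem_mem htmrL)
    have hne : t ≠ t + mr := by omega
    rw [inner_swap mc t (t + mr) hne st (orig.getD t []) (orig.getD (t + mr) []) htoplen hbotlen hti hbi]
    have hset1 : st.set t ((orig.getD (t + mr) []).drop mc ++ (orig.getD t []).drop mc)
        = T ++ (rowTop orig mr mc t :: (Mid' ++ (B ++ (orig.getD (t + mr) [] :: orig.drop (mr + (t + 1)))))) := by
      rw [hst, pv_set_append_right' _ _ _ _ (Nat.le_of_eq hTl)]
      simp [hTl, rowTop]
    rw [hset1, hre2, pv_set_append_right' _ _ _ _ (by rw [hl2]; omega), hl2,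
      show t + mr - (mr + t) = 0 by omega]
    simp only [List.set_cons_zero]
    have hx : (List.take mc (orig.getD (t + mr) []) ++ List.take mc (orig.getD t []))
        = rowBot orig mr mc t := rfl
    rw [hx]
    simp [List.map_append, ← hT, ← hBdef]
-- ===== VERDICT (by name: the statement is the Claim_ definition above) =====
theorem swap_quarters_spec : Claim_equal_swap_quarters := by
  intro matrix hdom hpre
  obtain ⟨hnil, hM, hN, hrect⟩ := hpre
  show swap_quarters matrix = swap_quarters_alt matrix
  have hcond : ¬(matrix.length % 2 ≠ 0 ∨ (matrix.headD []).length % 2 ≠ 0) := by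
    have hN' : (matrix.head?.getD []).length % 2 = 0 := by simpa using hN
    simp [hM, hN']
  rw [portA_eq, if_neg hcond]
  set mr := matrix.length / 2 with hmr
  set mc := (matrix.headD []).length / 2 with hmc
  have hlen : matrix.length = mr + mr := by omega
  have hrect' : ∀ row ∈ matrix, row.length = mc + mc := by
    intro row hrow
    have := hrect row hrow
    omega
  rw [outer_aux matrix mr mc hlen hrect' mr (Nat.le_refl mr)]
  have h0 : (matrix.drop mr).take (mr - mr) = ([] : List (List Int)) := by simp
  have h1 : matrix.drop (mr + mr) = ([] : List (List Int)) :=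
    List.drop_eq_nil_of_le (by omega)
  rw [h0, h1, List.append_nil, List.nil_append]
  show _ = swap_quarters_alt matrix
  simp only [swap_quarters_alt]
  rw [if_neg hcond]
  rfl
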